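-- pv_equiv track=rewrite | github.com/swmcpherson19/School | BinpackDev.py | checkAllPoints
-- ===== SOURCE A (Python) =====
-- def checkAllPoints(articles, bin_contents):
--     """ Check to be sure that all items are packed in one bin """
--
--     err_mess = ""
--     err_mult= False
--     checkit = {}
--     for this_bin in bin_contents:
--         for this_art in this_bin:
--             checkit[this_art] = checkit.get(this_art,0) + 1
--             if checkit[this_art] > 1:
--                 err_mult = True
--                 err_mess += "Loc assigned mult times"
--
--     err_all = False
--     for key_art in articles.keys():
--         if key_art not in checkit.keys():
--             err_all = True
--             err_mess += "Some locs not assigned to bins"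
--
--     return err_mult, err_all, err_mess
-- ===== SOURCE B (Python) =====
-- def checkAllPoints(articles, bin_contents):
--     """ Check to be sure that all items are packed in one bin """
--     items = [art for this_bin in bin_contents for art in this_bin]
--     seen = set(items)
--     dups = len(items) - len(seen)
--     missing = sum(1 for key_art in articles if key_art not in seen)
--     err_mess = "Loc assigned mult times" * dups + "Some locs not assigned to bins" * missing
--     return dups > 0, missing > 0, err_mess
-- ===== Notes on version B (the rewrite author's own statement) =====
-- stated objective: simpler
-- what changed: A interleaves counting with incremental message appending in one stateful pass; B first builds the flat item list and its distinct set, derives the duplicate and missing counts, and formats the whole message by string repetition.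
import Mathlib
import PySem

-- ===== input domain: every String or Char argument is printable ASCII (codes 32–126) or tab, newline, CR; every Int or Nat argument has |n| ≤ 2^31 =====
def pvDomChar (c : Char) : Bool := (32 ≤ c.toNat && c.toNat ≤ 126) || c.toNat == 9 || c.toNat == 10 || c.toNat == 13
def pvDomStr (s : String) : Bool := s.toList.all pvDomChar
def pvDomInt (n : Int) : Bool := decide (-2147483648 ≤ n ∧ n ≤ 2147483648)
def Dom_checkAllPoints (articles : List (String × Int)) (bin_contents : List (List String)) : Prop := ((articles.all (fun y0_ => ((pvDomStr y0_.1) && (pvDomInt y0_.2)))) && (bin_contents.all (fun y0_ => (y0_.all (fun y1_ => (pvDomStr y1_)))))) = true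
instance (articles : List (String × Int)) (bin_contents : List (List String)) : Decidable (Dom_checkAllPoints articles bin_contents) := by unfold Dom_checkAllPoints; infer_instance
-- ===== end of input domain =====

-- B replaces A's interleaved count-while-appending pass by "count first, then format":
-- build the multiset of packed items once, derive dup/missing counts, and emit each message by
-- string repetition; objective: simpler.

-- ===== PORT A =====
def pvMsgDup : List Char := "Loc assigned mult times".toList
def pvMsgMiss : List Char := "Some locs not assigned to bins".toList

-- one iteration of A's inner 'for this_art in this_bin' body (err_mess carried as List Char, joined at return)
def pvStepA (st : PySem.Dict String Int × Bool × List Char) (art : String) :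
    PySem.Dict String Int × Bool × List Char :=
  let d := st.1.modify art 0 (· + 1)
  if d.getD art 0 > 1 then (d, true, st.2.2 ++ pvMsgDup) else (d, st.2.1, st.2.2)

def checkAllPoints (articles : List (String × Int)) (bin_contents : List (List String)) : Bool × Bool × String :=
  let st := bin_contents.foldl (fun st this_bin => this_bin.foldl pvStepA st)
      (PySem.Dict.empty, false, ([] : List Char))
  let fin := ((PySem.Dict.mk articles).keys).foldl
      (fun (p : Bool × List Char) key_art =>
        if !(st.1.contains key_art) then (true, p.2 ++ pvMsgMiss) else p)
      (false, st.2.2)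
  (st.2.1, fin.1, String.ofList fin.2)

-- ===== PORT B =====
def checkAllPoints_alt (articles : List (String × Int)) (bin_contents : List (List String)) : Bool × Bool × String :=
  let items := bin_contents.flatten
  let seen : PySem.Set String := PySem.Set.ofList items
  let dups : Nat := items.length - seen.length
  let missing : Nat :=
    (((PySem.Dict.mk articles).keys).filter (fun key_art => !(PySem.Set.contains seen key_art))).length
  let err_mess := PySem.List.pyRepeat pvMsgDup (dups : Int) ++ PySem.List.pyRepeat pvMsgMiss (missing : Int)
  (decide (0 < dups), decide (0 < missing), String.ofList err_mess)

-- ===== PRECONDITION & SPEC =====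
def Spec_checkAllPoints (articles : List (String × Int)) (bin_contents : List (List String)) (out : Bool × Bool × String) : Prop := out = checkAllPoints_alt articles bin_contents
instance (articles : List (String × Int)) (bin_contents : List (List String)) (out : Bool × Bool × String) : Decidable (Spec_checkAllPoints articles bin_contents out) := by unfold Spec_checkAllPoints; infer_instance

-- ===== CLAIM (what is proved, stated in full; the proofs are below) =====
def Claim_equal_checkAllPoints : Prop := ∀ (articles : List (String × Int)) (bin_contents : List (List String)), Dom_checkAllPoints articles bin_contents → Spec_checkAllPoints articles bin_contents (checkAllPoints articles bin_contents)

-- ===== LEMMAS AND PROOFS =====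
lemma pvRep_succ (xs : List Char) (n : Nat) :
    PySem.List.pyRepeat xs ((n + 1 : Nat) : Int) = PySem.List.pyRepeat xs (n : Int) ++ xs := by
  simp [PySem.List.pyRepeat, List.replicate_succ']

lemma pvLoop1_spec (items : List String) :
    items.foldl pvStepA (PySem.Dict.empty, false, ([] : List Char))
      = (PySem.Dict.counter items,
         decide ((PySem.Set.ofList items).length < items.length),
         PySem.List.pyRepeat pvMsgDup ((items.length - (PySem.Set.ofList items).length : Nat) : Int)) := by
  induction items using List.reverseRecOn with
  | nil => simp [PySem.Dict.counter, PySem.Set.ofList, PySem.List.pyRepeat]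
  | append_singleton ys x ih =>
    have hle := PySem.Set.length_ofList_le (α := String) ys
    rw [List.foldl_append, ih]
    simp only [List.foldl_cons, List.foldl_nil]
    unfold pvStepA
    simp only [← PySem.Dict.counter_append_singleton, PySem.Dict.getD_counter,
      List.count_append, List.count_singleton, beq_self_eq_true, reduceIte,
      PySem.Set.ofList_append_singleton]
    by_cases hx : x ∈ ys
    · have hc : 0 < ys.count x := List.count_pos_iff.mpr hx
      have hmem : x ∈ PySem.Set.ofList ys := (PySem.Set.mem_ofList ys x).mpr hx
      rw [PySem.Set.add_of_mem hmem]
      rw [if_pos (by push_cast; omega)]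
      have h2 : (ys ++ [x]).length - (PySem.Set.ofList ys).length
          = (ys.length - (PySem.Set.ofList ys).length) + 1 := by
        simp [List.length_append]; omega
      rw [h2, pvRep_succ]
      simp
      omega
    · have hc : ys.count x = 0 := List.count_eq_zero.mpr hx
      have hmem : x ∉ PySem.Set.ofList ys := fun h => hx ((PySem.Set.mem_ofList ys x).mp h)
      rw [PySem.Set.add_of_not_mem hmem]
      rw [if_neg (by push_cast; omega)]
      have h2 : (ys ++ [x]).length - ((PySem.Set.ofList ys) ++ [x]).length
          = ys.length - (PySem.Set.ofList ys).length := by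
        simp [List.length_append]
      rw [h2]
      simp


lemma pvLoop2_spec (d : PySem.Dict String Int) (keys : List String) (s : List Char) :
    keys.foldl
        (fun (p : Bool × List Char) k => if !(d.contains k) then (true, p.2 ++ pvMsgMiss) else p)
        (false, s)
      = (decide (0 < (keys.filter (fun k => !(d.contains k))).length),
         s ++ PySem.List.pyRepeat pvMsgMiss ((keys.filter (fun k => !(d.contains k))).length : Int)) := by
  induction keys using List.reverseRecOn with
  | nil => simp [PySem.List.pyRepeat]
  | append_singleton ys k ih =>
    rw [List.foldl_append, ih]
    simp only [List.foldl_cons, List.foldl_nil, List.filter_append]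
    by_cases hk : d.contains k
    · simp [hk]
    · simp only [Bool.not_eq_true] at hk
      simp only [List.filter_cons, List.filter_nil, hk]
      simp only [Bool.not_false, if_pos]
      simp only [List.length_append, List.length_cons, List.length_nil]
      rw [pvRep_succ]
      simp [List.append_assoc]

lemma pvFilter_eq (items : List String) (keys : List String) :
    keys.filter (fun k => !((PySem.Dict.counter items).contains k))
      = keys.filter (fun k => !(PySem.Set.contains (PySem.Set.ofList items) k)) := by
  apply List.filter_congr
  intro k _
  simp [PySem.Dict.contains_counter, PySem.Set.contains_eq_listContains,
    List.contains_eq_mem, PySem.Set.mem_ofList]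

-- ===== VERDICT (by name: the statement is the Claim_ definition above) =====
theorem checkAllPoints_spec : Claim_equal_checkAllPoints := by
  intro articles bin_contents _
  unfold Spec_checkAllPoints
  simp only [checkAllPoints, checkAllPoints_alt]
  rw [← List.foldl_flatten (f := pvStepA), pvLoop1_spec, pvLoop2_spec, pvFilter_eq]
  simp
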